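-- pv_equiv track=rewrite | github.com/AndreiApricopoai/Faculty-Python-Course | Lab2/main.py | number_and_max_palindrome
-- ===== SOURCE A (Python) =====
-- def is_palindrome(n: int) -> bool:
--     s = str(n)
--     return s == s[::-1]
--
-- def number_and_max_palindrome(numbers: list[int]) -> tuple:
--     count = 0
--     max_palindrome = -1
--
--     for number in numbers:
--         if is_palindrome(number):
--             count = count + 1
--             if number > max_palindrome:
--                 max_palindrome = number
--
--     return (count, max_palindrome)
-- ===== SOURCE B (Python) =====
-- def is_palindrome(n: int) -> bool:
--     s = str(n)
--     return s == s[::-1]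
--
-- def number_and_max_palindrome(numbers: list[int]) -> tuple:
--     count = sum(1 for n in numbers if is_palindrome(n))
--     for n in sorted(numbers, reverse=True):
--         if is_palindrome(n):
--             return (count, n)
--     return (count, -1)
-- ===== Notes on version B (the rewrite author's own statement) =====
-- stated objective: alternative
-- what changed: A's fused loop maintaining count and a running max is replaced by a sort-then-scan algorithm: the max palindrome is the FIRST palindrome found when scanning the list sorted in descending order (early exit), and the count is a separate sum over a generator; no running maximum is ever maintained.
import Mathlib
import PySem

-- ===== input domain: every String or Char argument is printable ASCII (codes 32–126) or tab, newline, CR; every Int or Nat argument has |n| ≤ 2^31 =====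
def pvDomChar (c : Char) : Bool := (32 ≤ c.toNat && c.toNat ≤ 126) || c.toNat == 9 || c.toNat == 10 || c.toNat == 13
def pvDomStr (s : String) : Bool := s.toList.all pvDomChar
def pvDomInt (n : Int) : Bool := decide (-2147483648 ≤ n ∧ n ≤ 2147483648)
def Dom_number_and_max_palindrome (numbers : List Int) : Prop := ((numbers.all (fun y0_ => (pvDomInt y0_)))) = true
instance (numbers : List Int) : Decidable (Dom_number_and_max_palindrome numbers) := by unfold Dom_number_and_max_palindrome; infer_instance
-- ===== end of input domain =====

-- B replaces A's fused count+running-max loop by a sort-then-scan algorithm: count the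
-- palindromes separately, and take the FIRST palindrome of the descending-sorted list as the max.


-- ===== PORT A =====
-- helper is_palindrome, shared by both Python versions: s = str(n); s == s[::-1]
def is_palindrome (n : Int) : Bool :=
  let s := PySem.Int.toChars n
  s == ((PySem.List.slice? s none none (-1)).getD [])

def number_and_max_palindrome (numbers : List Int) : Int × Int :=
  numbers.foldl
    (fun st number =>
      if is_palindrome number then
        (st.1 + 1, if number > st.2 then number else st.2)
      else st)
    (0, -1)

-- ===== PORT B =====
-- count = sum(1 for n in numbers if is_palindrome(n));
-- then scan sorted(numbers, reverse=True) and return at the first palindrome (find?).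
def number_and_max_palindrome_alt (numbers : List Int) : Int × Int :=
  let count : Int := ((numbers.filter (fun n => is_palindrome n)).map (fun _ => (1 : Int))).sum
  match (PySem.List.sorted numbers (fun x => x) true).find? (fun n => is_palindrome n) with
  | some n => (count, n)
  | none => (count, -1)

-- ===== PRECONDITION & SPEC =====
def Spec_number_and_max_palindrome (numbers : List Int) (out : Int × Int) : Prop := out = number_and_max_palindrome_alt numbers
instance (numbers : List Int) (out : Int × Int) : Decidable (Spec_number_and_max_palindrome numbers out) := by unfold Spec_number_and_max_palindrome; infer_instance

-- ===== CLAIM (what is proved, stated in full; the proofs are below) =====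
def Claim_equal_number_and_max_palindrome : Prop := ∀ (numbers : List Int), Dom_number_and_max_palindrome numbers → Spec_number_and_max_palindrome numbers (number_and_max_palindrome numbers)

-- ===== LEMMAS AND PROOFS =====

-- Nat.toDigitsCore never shrinks the accumulator
theorem toDigitsCore_length_le (b : Nat) : ∀ (f n : Nat) (tl : List Char),
    tl.length ≤ (Nat.toDigitsCore b f n tl).length := by
  intro f
  induction f with
  | zero => intro n tl; simp [Nat.toDigitsCore]
  | succ f ih =>
    intro n tl
    simp only [Nat.toDigitsCore]
    split
    · simp
    · exact le_trans (by simp) (ih _ (Nat.digitChar (n % b) :: tl))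

theorem toDigitsCore_length_lt (b : Nat) (f n : Nat) (tl : List Char) :
    tl.length < (Nat.toDigitsCore b (f + 1) n tl).length := by
  simp only [Nat.toDigitsCore]
  split
  · simp
  · exact lt_of_lt_of_le (by simp)
      (toDigitsCore_length_le b f (n / b) (Nat.digitChar (n % b) :: tl))

theorem toDigits_ne_nil (b n : Nat) : Nat.toDigits b n ≠ [] := by
  have h := toDigitsCore_length_lt b n n []
  simp only [Nat.toDigits]
  intro hc
  rw [hc] at h
  simp at h

theorem digitChar_ne_dash (d : Nat) : Nat.digitChar d ≠ '-' := by
  by_cases h : d < 16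
  · interval_cases d <;> decide
  · unfold Nat.digitChar
    rw [if_neg (by omega), if_neg (by omega), if_neg (by omega), if_neg (by omega),
        if_neg (by omega), if_neg (by omega), if_neg (by omega), if_neg (by omega),
        if_neg (by omega), if_neg (by omega), if_neg (by omega), if_neg (by omega),
        if_neg (by omega), if_neg (by omega), if_neg (by omega), if_neg (by omega)]
    decide

theorem toDigitsCore_no_dash (b : Nat) : ∀ (f n : Nat) (tl : List Char),
    (∀ c ∈ tl, c ≠ '-') → ∀ c ∈ Nat.toDigitsCore b f n tl, c ≠ '-' := by
  intro f
  induction f with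
  | zero => intro n tl h; simpa [Nat.toDigitsCore] using h
  | succ f ih =>
    intro n tl h
    simp only [Nat.toDigitsCore]
    split
    · intro c hc
      rcases List.mem_cons.mp hc with h1 | h2
      · subst h1; exact digitChar_ne_dash _
      · exact h c h2
    · refine ih _ _ ?_
      intro c hc
      rcases List.mem_cons.mp hc with h1 | h2
      · subst h1; exact digitChar_ne_dash _
      · exact h c h2

theorem toDigits_no_dash (b n : Nat) : ∀ c ∈ Nat.toDigits b n, c ≠ '-' :=
  toDigitsCore_no_dash b _ n [] (by simp)

-- a negative integer is never a palindrome: str(n) starts with '-' and ends with a digit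
theorem is_palindrome_nonneg {n : Int} (h : is_palindrome n = true) : 0 ≤ n := by
  by_contra hneg
  have hn : n < 0 := by omega
  have heq : PySem.Int.toChars n = (PySem.Int.toChars n).reverse :=
    beq_iff_eq.mp (by simpa [is_palindrome, PySem.List.slice?_none_none_neg_one] using h)
  have hform : PySem.Int.toChars n = '-' :: Nat.toDigits 10 n.natAbs := by
    simp [PySem.Int.toChars, hn]
  obtain ⟨y, t, hyt⟩ := List.exists_cons_of_ne_nil (toDigits_ne_nil 10 n.natAbs)
  have hh := congrArg List.head? heq.symm
  rw [hform, List.head?_reverse] at hh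
  have hlast : ('-' :: y :: t).getLast? = some '-' := by
    rw [hyt] at hh; simpa using hh
  rw [List.getLast?_cons_cons] at hlast
  have hmem : '-' ∈ y :: t := List.mem_of_getLast? hlast
  exact toDigits_no_dash 10 n.natAbs '-' (hyt ▸ hmem) rfl

-- A's fused loop, characterised by the filtered list
theorem foldl_fused (xs : List Int) : ∀ (c m : Int),
    xs.foldl
      (fun st number =>
        if is_palindrome number then
          (st.1 + 1, if number > st.2 then number else st.2)
        else st)
      (c, m)
    = (c + ((xs.filter (fun n => is_palindrome n)).length : Int),
       (xs.filter (fun n => is_palindrome n)).foldl max m) := by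
  induction xs with
  | nil => intro c m; simp
  | cons x t ih =>
    intro c m
    by_cases hx : is_palindrome x = true
    · have hmax : (if x > m then x else m) = max m x := by
        rw [max_def]; split_ifs <;> omega
      simp only [List.foldl_cons, List.filter_cons, hx, if_pos, hmax]
      rw [ih]
      simp only [Prod.mk.injEq, List.length_cons]
      exact ⟨by push_cast; ring, trivial⟩
    · simp only [List.foldl_cons, List.filter_cons, hx]
      simp only [Bool.false_eq_true, if_false]
      exact ih c m

-- find? is the head of the filtered list
theorem find?_eq_head?_filter {α : Type} (p : α → Bool) (l : List α) :
    l.find? p = (l.filter p).head? := by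
  induction l with
  | nil => simp
  | cons x t ih =>
    by_cases hx : p x
    · rw [List.find?_cons_of_pos hx, List.filter_cons_of_pos hx, List.head?_cons]
    · rw [List.find?_cons_of_neg (by simp [hx]), List.filter_cons_of_neg (by simp [hx]), ih]

-- folding max over a list bounded by its seed
theorem foldl_max_of_le (x : Int) : ∀ (t : List Int), (∀ y ∈ t, y ≤ x) → t.foldl max x = x := by
  intro t
  induction t with
  | nil => simp
  | cons y s ih =>
    intro h
    have hy : y ≤ x := h y (List.mem_cons_self)
    simp only [List.foldl_cons, max_eq_left hy]
    exact ih (fun z hz => h z (List.mem_cons_of_mem _ hz))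

-- sum of ones is the length
theorem sum_map_one (l : List Int) : (l.map (fun _ => (1 : Int))).sum = (l.length : Int) := by
  induction l with
  | nil => simp
  | cons x t ih => simp; ring

-- ===== VERDICT (by name: the statement is the Claim_ definition above) =====
theorem number_and_max_palindrome_spec : Claim_equal_number_and_max_palindrome := by
  intro numbers _
  unfold Spec_number_and_max_palindrome number_and_max_palindrome number_and_max_palindrome_alt
  rw [foldl_fused, sum_map_one]
  have hperm : (PySem.List.sorted numbers (fun x => x) true).Perm numbers :=
    PySem.List.sorted_perm numbers (fun x => x) true
  have hpermf : ((PySem.List.sorted numbers (fun x => x) true).filter (fun n => is_palindrome n)).Perm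
      (numbers.filter (fun n => is_palindrome n)) := hperm.filter _
  have hfold : (numbers.filter (fun n => is_palindrome n)).foldl max (-1)
      = ((PySem.List.sorted numbers (fun x => x) true).filter (fun n => is_palindrome n)).foldl max (-1) := by
    haveI : RightCommutative (max : Int → Int → Int) := ⟨fun a b c => by omega⟩
    exact hpermf.symm.foldl_eq (-1)
  rw [find?_eq_head?_filter]
  cases hp : (PySem.List.sorted numbers (fun x => x) true).filter (fun n => is_palindrome n) with
  | nil =>
    have hnil : numbers.filter (fun n => is_palindrome n) = [] := by
      have h2 := hpermf; rw [hp] at h2; exact h2.symm.eq_nil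
    rw [hfold, hp, hnil]; simp
  | cons x t =>
    have hpw : ((PySem.List.sorted numbers (fun x => x) true).filter (fun n => is_palindrome n)).Pairwise
        (fun a b => b ≤ a) :=
      (PySem.List.sorted_pairwise_rev numbers (fun x => x)).filter _
    have hub : ∀ y ∈ t, y ≤ x := by
      have := hp ▸ hpw
      exact fun y hy => (List.pairwise_cons.mp this).1 y hy
    have hxpal : is_palindrome x = true := by
      have : x ∈ (PySem.List.sorted numbers (fun x => x) true).filter (fun n => is_palindrome n) := by
        rw [hp]; exact List.mem_cons_self
      exact List.of_mem_filter this
    have hx0 : (0 : Int) ≤ x := is_palindrome_nonneg hxpal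
    rw [hfold, hp]
    simp only [List.head?_cons, List.foldl_cons]
    rw [max_eq_right (by omega : (-1 : Int) ≤ x), foldl_max_of_le x t hub]
    simp
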